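-- pv_equiv track=rewrite | github.com/Isaac-Flath/rag-eval-demo-app | create_search_index.py | chunk_by_markdown_sections
-- ===== SOURCE A (Python) =====
-- def chunk_by_markdown_sections(markdown_text, min_length=250):
--     """Split markdown text into chunks based on header sections."""
--     lines = markdown_text.split('\n')
--     chunks = []
--     current_chunk = []
--     current_title = "Introduction"
--
--     for line in lines:
--         if line.startswith('#'):  # New header found
--             # Save previous chunk if it's substantial
--             if current_chunk and len('\n'.join(current_chunk)) >= min_length:
--                 chunks.append({'title': current_title, 'content': '\n'.join(current_chunk)})
--
--             # Start new chunk
--             current_title = line.lstrip('# ')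
--             current_chunk = [line]
--         else:
--             current_chunk.append(line)
--
--     # Add the final chunk if it exists and meets length requirement
--     if current_chunk and len('\n'.join(current_chunk)) >= min_length:
--         chunks.append({'title': current_title, 'content': '\n'.join(current_chunk)})
--     return chunks
-- ===== SOURCE B (Python) =====
-- def chunk_by_markdown_sections(markdown_text, min_length=250):
--     """Split markdown text into chunks based on header sections.
--
--     Reverse traversal: walk the lines back-to-front, so the lines
--     belonging to each header are already in hand when the header is met;
--     the leftover prefix becomes the 'Introduction' section. Sections are
--     collected in reverse order and reversed once at the end, then
--     filtered/formatted in a final comprehension."""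
--     secs = []
--     buf = []
--     for line in reversed(markdown_text.split('\n')):
--         if line.startswith('#'):
--             secs.append((line.lstrip('# '), [line] + buf))
--             buf = []
--         else:
--             buf = [line] + buf
--     secs.append(("Introduction", buf))
--     secs.reverse()
--     return [{'title': t, 'content': '\n'.join(ls)}
--             for t, ls in secs if ls and len('\n'.join(ls)) >= min_length]
-- ===== Notes on version B (the rewrite author's own statement) =====
-- stated objective: alternative
-- what changed: Replaces A's forward loop that flushes a formatted chunk whenever the next header appears (plus a duplicated post-loop flush) by a reverse traversal: walking the lines back-to-front each header already has its body lines in hand, the leftover prefix is the Introduction section, and the collected sections are reversed once and then filtered/formatted in a separate comprehension.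
import Mathlib
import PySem

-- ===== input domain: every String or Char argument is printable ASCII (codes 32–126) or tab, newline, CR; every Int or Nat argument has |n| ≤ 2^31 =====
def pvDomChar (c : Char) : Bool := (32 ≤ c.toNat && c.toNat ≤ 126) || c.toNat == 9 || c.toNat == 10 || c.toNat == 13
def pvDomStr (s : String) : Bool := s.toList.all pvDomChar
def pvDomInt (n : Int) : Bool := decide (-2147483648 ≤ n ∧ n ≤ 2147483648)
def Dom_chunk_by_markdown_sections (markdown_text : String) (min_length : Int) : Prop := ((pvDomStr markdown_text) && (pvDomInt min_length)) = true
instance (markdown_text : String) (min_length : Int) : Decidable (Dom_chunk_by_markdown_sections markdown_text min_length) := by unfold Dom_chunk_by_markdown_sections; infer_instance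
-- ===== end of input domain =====

-- B traverses the lines in reverse (each header already has its body in hand) instead of
-- A's forward loop that flushes inside the loop and once more after it; objective: alternative.

-- s.lstrip('# '): drop leading characters from the set {'#', ' '} — exact for this char set
def pvLstripHashSpace (s : String) : String :=
  String.ofList (s.toList.dropWhile (fun c => c == '#' || c == ' '))

-- markdown_text.split('\n'): exact, sep is the nonempty "\n" (PySem.Chars.splitOn is the sep ≠ "" form)
def pvSplitNL (s : String) : List String :=
  (PySem.Chars.splitOn s.toList ['\n']).map String.ofList

-- ===== PORT A =====
-- the for-loop of A, as structural recursion over the lines with A's exact state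
def pvLoopA (min_length : Int) :
    List String → List (List (String × String)) → List String → String →
    List (List (String × String)) × List String × String
  | [], chunks, current_chunk, current_title => (chunks, current_chunk, current_title)
  | line :: rest, chunks, current_chunk, current_title =>
    if PySem.Str.startswith line "#" then
      let chunks' :=
        if current_chunk ≠ [] ∧ min_length ≤ PySem.Str.len (PySem.Str.join "\n" current_chunk) then
          chunks ++ [[("title", current_title), ("content", PySem.Str.join "\n" current_chunk)]]
        else chunks
      pvLoopA min_length rest chunks' [line] (pvLstripHashSpace line)
    else
      pvLoopA min_length rest chunks (current_chunk ++ [line]) current_title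

def chunk_by_markdown_sections (markdown_text : String) (min_length : Int) : List (List (String × String)) :=
  let lines := pvSplitNL markdown_text
  let st := pvLoopA min_length lines [] [] "Introduction"
  if st.2.1 ≠ [] ∧ min_length ≤ PySem.Str.len (PySem.Str.join "\n" st.2.1) then
    st.1 ++ [[("title", st.2.2), ("content", PySem.Str.join "\n" st.2.1)]]
  else st.1

-- ===== PORT B =====
-- B's reverse loop over reversed(lines) with state (secs, buf)
def pvLoopB : List String → List (String × List String) → List String →
    List (String × List String) × List String
  | [], secs, buf => (secs, buf)
  | line :: rest, secs, buf =>
    if PySem.Str.startswith line "#" then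
      pvLoopB rest (secs ++ [(pvLstripHashSpace line, line :: buf)]) []
    else
      pvLoopB rest secs (line :: buf)

-- one section's contribution to B's final comprehension
def pvEmitB (min_length : Int) (sec : String × List String) : List (List (String × String)) :=
  if sec.2 ≠ [] ∧ min_length ≤ PySem.Str.len (PySem.Str.join "\n" sec.2) then
    [[("title", sec.1), ("content", PySem.Str.join "\n" sec.2)]]
  else []

def chunk_by_markdown_sections_alt (markdown_text : String) (min_length : Int) : List (List (String × String)) :=
  let st := pvLoopB (pvSplitNL markdown_text).reverse [] []
  ((st.1 ++ [("Introduction", st.2)]).reverse).flatMap (pvEmitB min_length)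

-- ===== PRECONDITION & SPEC =====
def Spec_chunk_by_markdown_sections (markdown_text : String) (min_length : Int) (out : List (List (String × String))) : Prop := out = chunk_by_markdown_sections_alt markdown_text min_length
instance (markdown_text : String) (min_length : Int) (out : List (List (String × String))) : Decidable (Spec_chunk_by_markdown_sections markdown_text min_length out) := by unfold Spec_chunk_by_markdown_sections; infer_instance

-- ===== CLAIM (what is proved, stated in full; the proofs are below) =====
def Claim_equal_chunk_by_markdown_sections : Prop := ∀ (markdown_text : String) (min_length : Int), Dom_chunk_by_markdown_sections markdown_text min_length → Spec_chunk_by_markdown_sections markdown_text min_length (chunk_by_markdown_sections markdown_text min_length)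

-- ===== LEMMAS AND PROOFS =====
-- canonical list of header sections, in document order (proof-only helper)
def pvHsecs : List String → List (String × List String)
  | [] => []
  | l :: rest =>
    if PySem.Str.startswith l "#" then
      (pvLstripHashSpace l, l :: rest.takeWhile (fun x => !PySem.Str.startswith x "#")) :: pvHsecs rest
    else pvHsecs rest

-- forward grouping with A's state shape (proof-only helper bridging A's loop to the canonical sections)
def pvGroupF : List String → String → List String → List (String × List String)
  | [], title, buf => [(title, buf)]
  | line :: rest, title, buf =>
    if PySem.Str.startswith line "#" then
      (title, buf) :: pvGroupF rest (pvLstripHashSpace line) [line]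
    else
      pvGroupF rest title (buf ++ [line])

-- A's loop followed by its final flush = flatMap-emit over the forward grouping
theorem pvLoopA_eq (min_length : Int) (lines : List String) :
    ∀ (chunks : List (List (String × String))) (cur : List String) (title : String),
    (let st := pvLoopA min_length lines chunks cur title
     if st.2.1 ≠ [] ∧ min_length ≤ PySem.Str.len (PySem.Str.join "\n" st.2.1) then
       st.1 ++ [[("title", st.2.2), ("content", PySem.Str.join "\n" st.2.1)]]
     else st.1)
    = chunks ++ (pvGroupF lines title cur).flatMap (pvEmitB min_length) := by
  induction lines with
  | nil =>
    intro chunks cur title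
    simp only [pvLoopA, pvGroupF, List.flatMap_cons, List.flatMap_nil, List.append_nil, pvEmitB]
    split_ifs <;> simp
  | cons line rest ih =>
    intro chunks cur title
    cases h : PySem.Str.startswith line "#" with
    | true =>
      simp only [pvLoopA, pvGroupF, h, if_true, List.flatMap_cons]
      rw [ih]
      simp only [pvEmitB]
      split_ifs with hc
      · simp
      · simp
    | false =>
      simp only [pvLoopA, pvGroupF, h, Bool.false_eq_true, if_false]
      exact ih chunks (cur ++ [line]) title

-- the forward grouping equals Introduction-section + canonical header sections
theorem pvGroupF_eq (lines : List String) :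
    ∀ (title : String) (buf : List String),
    pvGroupF lines title buf
      = (title, buf ++ lines.takeWhile (fun x => !PySem.Str.startswith x "#")) :: pvHsecs lines := by
  induction lines with
  | nil => intro title buf; simp [pvGroupF, pvHsecs]
  | cons line rest ih =>
    intro title buf
    cases h : PySem.Chars.startswith line.toList ['#'] with
    | true => simp [pvGroupF, pvHsecs, PySem.Str.startswith, h, ih]
    | false => simp [pvGroupF, pvHsecs, PySem.Str.startswith, h, ih]

-- B's loop distributes over list append
theorem pvLoopB_append (xs ys : List String) :
    ∀ secs buf, pvLoopB (xs ++ ys) secs buf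
      = pvLoopB ys (pvLoopB xs secs buf).1 (pvLoopB xs secs buf).2 := by
  induction xs with
  | nil => intro secs buf; simp [pvLoopB]
  | cons x rest ih =>
    intro secs buf
    cases h : PySem.Chars.startswith x.toList ['#'] with
    | true => simp [pvLoopB, PySem.Str.startswith, h, ih]
    | false => simp [pvLoopB, PySem.Str.startswith, h, ih]

-- B's loop on the reversed lines builds the canonical header sections in reverse,
-- leaving the Introduction lines in buf
theorem pvLoopB_rev (lines : List String) :
    ∀ secs0, pvLoopB lines.reverse secs0 []
      = (secs0 ++ (pvHsecs lines).reverse,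
         lines.takeWhile (fun x => !PySem.Str.startswith x "#")) := by
  induction lines with
  | nil => intro secs0; simp [pvLoopB, pvHsecs]
  | cons line rest ih =>
    intro secs0
    rw [List.reverse_cons, pvLoopB_append, ih]
    cases h : PySem.Chars.startswith line.toList ['#'] with
    | true => simp [pvLoopB, pvHsecs, PySem.Str.startswith, h]
    | false => simp [pvLoopB, pvHsecs, PySem.Str.startswith, h]

-- ===== VERDICT (by name: the statement is the Claim_ definition above) =====
theorem chunk_by_markdown_sections_spec : Claim_equal_chunk_by_markdown_sections := by
  intro markdown_text min_length _
  unfold Spec_chunk_by_markdown_sections chunk_by_markdown_sections chunk_by_markdown_sections_alt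
  rw [pvLoopB_rev]
  have hA := pvLoopA_eq min_length (pvSplitNL markdown_text) [] [] "Introduction"
  simp only [List.nil_append] at hA
  rw [hA, pvGroupF_eq]
  simp
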